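-- pv_equiv track=rewrite | github.com/smuuule/aoc2023-smule | 09/solution.py | part2
-- ===== SOURCE A (Python) =====
-- def diffs(lst: list) -> list:
--     curr, prev = 0, lst[0]
--     result = []
--     for i in lst[1:]:
--         curr = i
--         result.append(curr - prev)
--         prev = i
--
--     return result
--
-- def part2(input):
--     count = 0
--     for history in input.splitlines():
--         first = []
--         history = list(map(int, history.split()))
--
--         while not all(i == 0 for i in history):
--             first.insert(0, history[0])
--             history = diffs(history)
--
--         temp = 0
--         for i in first:
--             temp = i - temp
--
--         count += temp
--
--     return count
-- ===== SOURCE B (Python) =====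
-- def diffs(lst: list) -> list:
--     return [b - a for a, b in zip(lst, lst[1:])]
--
-- def extrapolate(seq: list) -> int:
--     if all(i == 0 for i in seq):
--         return 0
--     return seq[0] - extrapolate(diffs(seq))
--
-- def part2(input):
--     return sum(extrapolate(list(map(int, line.split())))
--                for line in input.splitlines())
-- ===== Notes on version B (the rewrite author's own statement) =====
-- stated objective: simpler
-- what changed: Replaced the while-loop that collects each level's first element into a list (via insert(0,...)) and the separate alternating-subtraction fold with a direct recursion extrapolate(seq) = seq[0] - extrapolate(diffs(seq)), base 0 on an all-zero sequence; diffs is a zip comprehension instead of a manual prev/curr loop.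
import Mathlib
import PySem

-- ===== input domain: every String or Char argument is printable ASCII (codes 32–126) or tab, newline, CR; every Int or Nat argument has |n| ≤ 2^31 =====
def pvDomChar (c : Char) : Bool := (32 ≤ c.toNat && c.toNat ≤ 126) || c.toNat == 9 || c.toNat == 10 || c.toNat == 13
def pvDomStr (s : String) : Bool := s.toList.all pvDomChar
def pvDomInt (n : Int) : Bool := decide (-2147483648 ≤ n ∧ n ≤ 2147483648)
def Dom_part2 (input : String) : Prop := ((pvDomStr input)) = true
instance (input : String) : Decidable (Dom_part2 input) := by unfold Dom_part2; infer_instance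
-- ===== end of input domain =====

-- B replaces A's while-loop (collect each level's first element, then an alternating-subtraction
-- fold) with a direct recursion: extrapolate(seq) = seq[0] - extrapolate(diffs(seq)); objective: simpler.

-- ===== PORT A =====
-- A's diffs: manual prev/curr loop; Python raises IndexError on [] (A never calls it with []);
-- the [] branch here is unreachable from part2.
def diffsA (lst : List Int) : List Int :=
  match lst with
  | [] => []
  | p :: rest => (rest.foldl (fun (s : Int × List Int) i => (i, s.2 ++ [i - s.1])) (p, ([] : List Int))).2

-- needed by loopA's termination (and cited by the proofs below)
theorem diffsA_foldl (rest : List Int) (p : Int) (acc : List Int) :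
    (rest.foldl (fun (s : Int × List Int) i => (i, s.2 ++ [i - s.1])) (p, acc)).2
      = acc ++ (((p :: rest).zip rest).map (fun q => q.2 - q.1)) := by
  induction rest generalizing p acc with
  | nil => simp
  | cons q rest ih => simp [List.foldl_cons, ih, List.zip]

theorem diffsA_eq (lst : List Int) :
    diffsA lst = (lst.zip lst.tail).map (fun q => q.2 - q.1) := by
  cases lst with
  | nil => simp [diffsA]
  | cons p rest => simp [diffsA, diffsA_foldl]

-- A's while loop: first.insert(0, history[0]); history = diffs(history)
def loopA (history : List Int) (first : List Int) : List Int :=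
  if history.all (· == 0) then first
  else
    match _h : history with
    | [] => first   -- unreachable: an empty list satisfies the all-zero test
    | h0 :: _ => loopA (diffsA history) (h0 :: first)
termination_by history.length
decreasing_by
  subst _h; simp [diffsA_eq, List.length_zip]

def part2 (input : String) : Int :=
  (PySem.Str.splitlines input).foldl (fun count line =>
    let history := (PySem.Str.split₀ line).map (fun t => (PySem.Int.ofStr? t).getD 0)
      -- Pre_part2 excludes tokens on which int() raises, so getD is never the default
    let first := loopA history []
    let temp := first.foldl (fun temp i => i - temp) 0
    count + temp) 0

-- ===== PORT B =====
def diffsB (lst : List Int) : List Int :=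
  (lst.zip lst.tail).map (fun q => q.2 - q.1)

def extrapolateB (seq : List Int) : Int :=
  if seq.all (· == 0) then 0
  else
    match _h : seq with
    | [] => 0   -- unreachable: [] is all-zero
    | h0 :: _ => h0 - extrapolateB (diffsB seq)
termination_by seq.length
decreasing_by
  subst _h; simp [diffsB, List.length_zip]

def part2_alt (input : String) : Int :=
  ((PySem.Str.splitlines input).map (fun line =>
    extrapolateB ((PySem.Str.split₀ line).map (fun t => (PySem.Int.ofStr? t).getD 0)))).sum

-- ===== PRECONDITION & SPEC =====
-- Pre_ excludes inputs where some whitespace-separated token is not a valid int literal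
-- (Python's int() raises ValueError there).
def Pre_part2 (input : String) : Prop :=
  ((PySem.Str.splitlines input).all (fun line =>
    (PySem.Str.split₀ line).all (fun t => (PySem.Int.ofStr? t).isSome))) = true
instance (input : String) : Decidable (Pre_part2 input) := by unfold Pre_part2; infer_instance

def pvWitness_part2 : String := "0 3 6 9\n1 1"

def Spec_part2 (input : String) (out : Int) : Prop := out = part2_alt input
instance (input : String) (out : Int) : Decidable (Spec_part2 input out) := by unfold Spec_part2; infer_instance

-- ===== CLAIM (what is proved, stated in full; the proofs are below) =====
def Claim_equal_part2 : Prop := ∀ (input : String), Dom_part2 input → Pre_part2 input → Spec_part2 input (part2 input)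

-- ===== LEMMAS AND PROOFS =====

theorem loopA_zero (history first : List Int) (hz : (history.all (· == 0)) = true) :
    loopA history first = first := by
  rw [loopA.eq_def]; simp [hz]

theorem loopA_cons (h0 : Int) (rest first : List Int)
    (hz : ¬ (((h0 :: rest).all (· == 0)) = true)) :
    loopA (h0 :: rest) first = loopA (diffsA (h0 :: rest)) (h0 :: first) := by
  rw [loopA.eq_def]; simp [hz]

theorem extrapolateB_zero (seq : List Int) (hz : (seq.all (· == 0)) = true) :
    extrapolateB seq = 0 := by
  rw [extrapolateB.eq_def]; simp [hz]

theorem extrapolateB_cons (h0 : Int) (rest : List Int)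
    (hz : ¬ (((h0 :: rest).all (· == 0)) = true)) :
    extrapolateB (h0 :: rest) = h0 - extrapolateB (diffsB (h0 :: rest)) := by
  rw [extrapolateB.eq_def]; simp [hz]

theorem loopA_acc : ∀ (n : Nat) (history : List Int), history.length = n →
    ∀ first, loopA history first = loopA history [] ++ first := by
  intro n
  induction n using Nat.strong_induction_on with
  | _ n ih =>
    intro history hn first
    by_cases hz : (history.all (· == 0)) = true
    · rw [loopA_zero _ _ hz, loopA_zero _ _ hz]; simp
    · cases history with
      | nil => simp at hz
      | cons h0 rest =>
        rw [loopA_cons _ _ _ hz, loopA_cons _ _ _ hz]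
        have hlen : (diffsA (h0 :: rest)).length < n := by
          simp [diffsA_eq, List.length_zip] at *; omega
        rw [ih _ hlen _ rfl (h0 :: first), ih _ hlen _ rfl [h0]]
        simp

theorem main_line_aux : ∀ (n : Nat) (history : List Int), history.length = n →
    (loopA history []).foldl (fun temp i => i - temp) 0 = extrapolateB history := by
  intro n
  induction n using Nat.strong_induction_on with
  | _ n ih =>
    intro history hn
    by_cases hz : (history.all (· == 0)) = true
    · rw [loopA_zero _ _ hz, extrapolateB_zero _ hz]; simp
    · cases history with
      | nil => simp at hz
      | cons h0 rest =>
        rw [loopA_cons _ _ _ hz, extrapolateB_cons _ _ hz]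
        have hlen : (diffsA (h0 :: rest)).length < n := by
          simp [diffsA_eq, List.length_zip] at *; omega
        rw [loopA_acc _ _ rfl [h0], List.foldl_append, ih _ hlen _ rfl]
        simp [diffsA_eq, diffsB]

theorem main_line (history : List Int) :
    (loopA history []).foldl (fun temp i => i - temp) 0 = extrapolateB history :=
  main_line_aux history.length history rfl

-- ===== VERDICT (by name: the statement is the Claim_ definition above) =====
theorem part2_spec : Claim_equal_part2 := by
  intro input _ _
  unfold Spec_part2 part2 part2_alt
  rw [PySem.List.foldl_add (g := fun line =>
    (loopA ((PySem.Str.split₀ line).map (fun t => (PySem.Int.ofStr? t).getD 0)) []).foldl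
      (fun temp i => i - temp) 0)]
  simp [main_line]
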